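-- pv_equiv track=rewrite | github.com/jay841224/euler | p19.py | count_sundays
-- ===== SOURCE A (Python) =====
-- def count_sundays(start, end):
--     day = 2
--     count = 0
--     for y in range(start, end + 1):
--         i = 0
--         if y % 4 == 0:
--             if y % 100 == 0:
--                 if y % 400 == 0:
--                         i = 1
--             else:
--                 i = 1
--         months = [31, 28 + i, 31, 30, 31, 30, 31, 31, 30 , 31, 30, 31]
--         for m in months:
--             day += m
--             if day % 7 == 0:
--                 count += 1
--     return count
-- ===== SOURCE B (Python) =====
-- def count_sundays(start, end):
--     # Exploit Gregorian periodicity: 400 consecutive years always contain 146097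
--     # days (a multiple of 7) and the leap pattern repeats with period 400, so the
--     # count contributed by each 400-year block (from the same weekday offset) is
--     # identical: simulate at most one block and one remainder.
--     n = end - start + 1
--     if n <= 0:
--         return 0
--     CUM = [31, 59, 90, 120, 151, 181, 212, 243, 273, 304, 334, 365]
--
--     def year_hits(r, lp):
--         # months whose cumulative day-total, offset by r, is divisible by 7
--         c = 0
--         for j, s in enumerate(CUM):
--             if (r + s + (lp if j >= 1 else 0)) % 7 == 0:
--                 c += 1
--         return c
--
--     def block(k):
--         # count over k consecutive years starting at `start`, initial offset 2
--         c = 0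
--         r = 2
--         for j in range(k):
--             y = start + j
--             lp = 1 if y % 4 == 0 and (y % 100 != 0 or y % 400 == 0) else 0
--             c += year_hits(r, lp)
--             r = (r + 365 + lp) % 7
--         return c
--
--     q, rem = divmod(n, 400)
--     return q * block(400) + block(rem)
-- ===== Notes on version B (the rewrite author's own statement) =====
-- stated objective: alternative
-- what changed: Replaces the year-by-year, month-by-month simulation over the whole range with a 400-year Gregorian-period block scheme (a 400-year span always has 146097 days, a multiple of 7, and the leap pattern repeats), so B simulates at most one 400-year block plus the remainder with precomputed cumulative month totals and multiplies the block count by the number of full blocks; work per query is bounded by 800 simulated years regardless of range size.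
import Mathlib
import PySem

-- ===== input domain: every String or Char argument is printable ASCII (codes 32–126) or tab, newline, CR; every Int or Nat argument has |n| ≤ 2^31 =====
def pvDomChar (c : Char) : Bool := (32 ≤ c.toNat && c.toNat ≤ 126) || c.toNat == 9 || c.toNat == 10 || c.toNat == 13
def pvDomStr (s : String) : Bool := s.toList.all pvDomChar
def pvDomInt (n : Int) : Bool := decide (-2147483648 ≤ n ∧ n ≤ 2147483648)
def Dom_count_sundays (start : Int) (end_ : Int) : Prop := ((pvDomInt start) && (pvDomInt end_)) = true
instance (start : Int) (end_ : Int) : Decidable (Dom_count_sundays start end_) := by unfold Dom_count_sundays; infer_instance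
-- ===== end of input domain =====

-- B counts via the 400-year Gregorian period (146097 days, a multiple of 7): it
-- simulates at most one 400-year block plus the remainder instead of A's
-- year-by-year, month-by-month simulation over the whole range.


-- ===== PORT A =====
-- body of A's inner `for m in months` loop (state: (day, count))
def monthStepA (st2 : Int × Int) (m : Int) : Int × Int :=
  (st2.1 + m, if PySem.Int.mod (st2.1 + m) 7 = 0 then st2.2 + 1 else st2.2)

-- body of A's outer `for y in range(start, end + 1)` loop
def yearStepA (st : Int × Int) (y : Int) : Int × Int :=
  let i : Int :=
    if PySem.Int.mod y 4 = 0 then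
      if PySem.Int.mod y 100 = 0 then
        if PySem.Int.mod y 400 = 0 then 1 else 0
      else 1
    else 0
  let months : List Int := [31, 28 + i, 31, 30, 31, 30, 31, 31, 30, 31, 30, 31]
  months.foldl monthStepA st

def count_sundays (start : Int) (end_ : Int) : Int :=
  ((PySem.List.pyRange start (end_ + 1) 1).foldl yearStepA (2, 0)).2

-- ===== PORT B =====
def cumMonths : List Int := [31, 59, 90, 120, 151, 181, 212, 243, 273, 304, 334, 365]

def yearHits (r : Int) (lp : Int) : Int :=
  (PySem.List.enumerate cumMonths 0).foldl
    (fun (c : Int) js =>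
      if PySem.Int.mod (r + js.2 + (if js.1 ≥ 1 then lp else 0)) 7 = 0 then c + 1 else c) 0

-- body of B's `for j in range(k)` loop (state: (count, residue))
def yearStepB (start : Int) (st : Int × Int) (j : Int) : Int × Int :=
  let y := start + j
  let lp : Int :=
    if PySem.Int.mod y 4 = 0 ∧ (PySem.Int.mod y 100 ≠ 0 ∨ PySem.Int.mod y 400 = 0) then 1 else 0
  (st.1 + yearHits st.2 lp, PySem.Int.mod (st.2 + 365 + lp) 7)

def blockCount (start : Int) (k : Int) : Int :=
  ((PySem.List.pyRange 0 k 1).foldl (yearStepB start) (0, 2)).1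

def count_sundays_alt (start : Int) (end_ : Int) : Int :=
  if end_ - start + 1 ≤ 0 then 0
  else
    PySem.Int.floordiv (end_ - start + 1) 400 * blockCount start 400
      + blockCount start (PySem.Int.mod (end_ - start + 1) 400)

-- ===== PRECONDITION & SPEC =====
def Spec_count_sundays (start : Int) (end_ : Int) (out : Int) : Prop := out = count_sundays_alt start end_
instance (start : Int) (end_ : Int) (out : Int) : Decidable (Spec_count_sundays start end_ out) := by unfold Spec_count_sundays; infer_instance

-- ===== CLAIM (what is proved, stated in full; the proofs are below) =====
def Claim_equal_count_sundays : Prop := ∀ (start : Int) (end_ : Int), Dom_count_sundays start end_ → Spec_count_sundays start end_ (count_sundays start end_)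

-- ===== LEMMAS AND PROOFS =====

-- leap-year indicator in emod form (proof-side mirror of both ports' conditionals)
def pvLp (y : Int) : Int := if y % 4 = 0 ∧ (y % 100 ≠ 0 ∨ y % 400 = 0) then 1 else 0

def pvMonths (i : Int) : List Int := [31, 28 + i, 31, 30, 31, 30, 31, 31, 30, 31, 30, 31]

-- hit count of A's inner month loop, with running day d
def pvHits : List Int → Int → Int
  | [], _ => 0
  | m :: t, d => (if (d + m) % 7 = 0 then 1 else 0) + pvHits t (d + m)

-- A's outer loop hit count over a list of years, with running day d
def pvYH : List Int → Int → Int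
  | [], _ => 0
  | y :: t, d => pvHits (pvMonths (pvLp y)) d + pvYH t (d + 365 + pvLp y)

-- B's block loop hit count over a list of years, with running residue r
def pvGoB : List Int → Int → Int
  | [], _ => 0
  | y :: t, r => yearHits r (pvLp y) + pvGoB t ((r + 365 + pvLp y) % 7)

-- residue after a list of years
def pvAfter : List Int → Int → Int
  | [], r => r
  | y :: t, r => pvAfter t ((r + 365 + pvLp y) % 7)

-- k consecutive years starting at y
def pvYrs : Int → Nat → List Int
  | _, 0 => []
  | y, k + 1 => y :: pvYrs (y + 1) k

def pvDays (l : List Int) : Int := (l.map (fun y => 365 + pvLp y)).sum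

def natLp (j : Nat) : Nat := if j % 4 = 0 ∧ (j % 100 ≠ 0 ∨ j % 400 = 0) then 1 else 0

lemma pvLp_cases (y : Int) : pvLp y = 0 ∨ pvLp y = 1 := by
  unfold pvLp; split_ifs <;> simp

lemma pvLp_400 (y : Int) : pvLp (y + 400) = pvLp y := by
  unfold pvLp
  have h : ((y + 400) % 4 = 0 ∧ ((y + 400) % 100 ≠ 0 ∨ (y + 400) % 400 = 0)) ↔
      (y % 4 = 0 ∧ (y % 100 ≠ 0 ∨ y % 400 = 0)) := by omega
  rw [if_congr h rfl rfl]

lemma pvLp_natCast (j : Nat) : pvLp (j : Int) = ((natLp j : Nat) : Int) := by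
  unfold pvLp natLp
  have h : ((j : Int) % 4 = 0 ∧ ((j : Int) % 100 ≠ 0 ∨ (j : Int) % 400 = 0)) ↔
      (j % 4 = 0 ∧ (j % 100 ≠ 0 ∨ j % 400 = 0)) := by omega
  rw [if_congr h rfl rfl]
  split_ifs <;> simp

lemma iA_eq (y : Int) :
    (if PySem.Int.mod y 4 = 0 then
      if PySem.Int.mod y 100 = 0 then
        if PySem.Int.mod y 400 = 0 then (1:Int) else 0
      else 1
    else 0) = pvLp y := by
  rw [PySem.Int.mod_eq_emod_of_pos (by norm_num), PySem.Int.mod_eq_emod_of_pos (by norm_num),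
    PySem.Int.mod_eq_emod_of_pos (by norm_num)]
  unfold pvLp
  split_ifs <;> first | rfl | (exfalso; tauto)

lemma lpB_eq (y : Int) :
    (if PySem.Int.mod y 4 = 0 ∧ (PySem.Int.mod y 100 ≠ 0 ∨ PySem.Int.mod y 400 = 0) then (1:Int) else 0)
      = pvLp y := by
  rw [PySem.Int.mod_eq_emod_of_pos (by norm_num), PySem.Int.mod_eq_emod_of_pos (by norm_num),
    PySem.Int.mod_eq_emod_of_pos (by norm_num)]
  rfl

lemma innerA (ms : List Int) : ∀ d c : Int,
    ms.foldl monthStepA (d, c) = (d + ms.sum, c + pvHits ms d) := by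
  induction ms with
  | nil => intro d c; simp [pvHits]
  | cons m t ih =>
    intro d c
    simp only [List.foldl_cons, monthStepA]
    rw [ih]
    simp only [pvHits, List.sum_cons, Prod.mk.injEq,
      PySem.Int.mod_eq_emod_of_pos (b := 7) (by norm_num)]
    constructor
    · ring
    · split_ifs <;> ring

lemma monthsSum (i : Int) : (pvMonths i).sum = 365 + i := by
  simp [pvMonths]; ring

lemma yearStepA_eq (st : Int × Int) (y : Int) :
    yearStepA st y = (st.1 + 365 + pvLp y, st.2 + pvHits (pvMonths (pvLp y)) st.1) := by
  obtain ⟨d, c⟩ := st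
  simp only [yearStepA, iA_eq]
  rw [show ([31, 28 + pvLp y, 31, 30, 31, 30, 31, 31, 30, 31, 30, 31] : List Int)
      = pvMonths (pvLp y) from rfl]
  rw [innerA, monthsSum]
  simp only [Prod.mk.injEq]
  exact ⟨by ring, trivial⟩

lemma outerA (ys : List Int) : ∀ d c : Int,
    ys.foldl yearStepA (d, c) = (d + pvDays ys, c + pvYH ys d) := by
  induction ys with
  | nil => intro d c; simp [pvDays, pvYH]
  | cons y t ih =>
    intro d c
    simp only [List.foldl_cons, yearStepA_eq]
    rw [ih]
    simp only [pvYH, pvDays, List.map_cons, List.sum_cons, Prod.mk.injEq]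
    constructor <;> ring

lemma outerA_snd (ys : List Int) (d c : Int) :
    (ys.foldl yearStepA (d, c)).2 = c + pvYH ys d := by
  rw [outerA]

lemma hits_congr (ms : List Int) : ∀ d e : Int, d % 7 = e % 7 → pvHits ms d = pvHits ms e := by
  induction ms with
  | nil => intro d e _; rfl
  | cons m t ih =>
    intro d e h
    simp only [pvHits]
    have h1 : ((d + m) % 7 = 0) ↔ ((e + m) % 7 = 0) := by omega
    rw [if_congr h1 rfl rfl, ih (d + m) (e + m) (by omega)]

lemma yearHits_congr_aux (lp r r' : Int) (h : r % 7 = r' % 7) (l : List (Int × Int)) :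
    ∀ c : Int,
      l.foldl (fun (c : Int) js =>
        if PySem.Int.mod (r + js.2 + (if js.1 ≥ 1 then lp else 0)) 7 = 0 then c + 1 else c) c
      = l.foldl (fun (c : Int) js =>
        if PySem.Int.mod (r' + js.2 + (if js.1 ≥ 1 then lp else 0)) 7 = 0 then c + 1 else c) c := by
  induction l with
  | nil => intro c; rfl
  | cons js t ih =>
    intro c
    simp only [List.foldl_cons]
    have h1 : (PySem.Int.mod (r + js.2 + (if js.1 ≥ 1 then lp else 0)) 7 = 0)
        ↔ (PySem.Int.mod (r' + js.2 + (if js.1 ≥ 1 then lp else 0)) 7 = 0) := by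
      rw [PySem.Int.mod_eq_emod_of_pos (by norm_num), PySem.Int.mod_eq_emod_of_pos (by norm_num)]
      omega
    rw [if_congr h1 rfl rfl]
    exact ih _

lemma yearHits_congr (r r' lp : Int) (h : r % 7 = r' % 7) : yearHits r lp = yearHits r' lp := by
  unfold yearHits
  exact yearHits_congr_aux lp r r' h _ 0

lemma yearHits_eq_pvHits (r d lp : Int) (hl : lp = 0 ∨ lp = 1) (h : r % 7 = d % 7) :
    yearHits r lp = pvHits (pvMonths lp) d := by
  have h1 : yearHits r lp = yearHits (r % 7) lp := yearHits_congr _ _ _ (by omega)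
  have h2 : pvHits (pvMonths lp) d = pvHits (pvMonths lp) (r % 7) := hits_congr _ _ _ (by omega)
  rw [h1, h2]
  have hb0 : 0 ≤ r % 7 := by omega
  have hb1 : r % 7 < 7 := by omega
  set t := r % 7 with ht
  clear_value t
  interval_cases t <;> rcases hl with rfl | rfl <;> decide

lemma goB_eq_pvYH (ys : List Int) : ∀ r d : Int, r % 7 = d % 7 → pvGoB ys r = pvYH ys d := by
  induction ys with
  | nil => intro r d _; rfl
  | cons y t ih =>
    intro r d h
    simp only [pvGoB, pvYH]
    have hx : ((r + 365 + pvLp y) % 7) % 7 = (d + 365 + pvLp y) % 7 := by omega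
    rw [yearHits_eq_pvHits r d (pvLp y) (pvLp_cases y) h, ih _ _ hx]

lemma yearStepB_eq (start : Int) (st : Int × Int) (j : Int) :
    yearStepB start st j
      = (st.1 + yearHits st.2 (pvLp (start + j)), (st.2 + 365 + pvLp (start + j)) % 7) := by
  obtain ⟨c, r⟩ := st
  simp only [yearStepB, lpB_eq, PySem.Int.mod_eq_emod_of_pos (b := 7) (by norm_num)]

lemma blockB_eq (start : Int) (js : List Int) : ∀ c r : Int,
    (js.foldl (yearStepB start) (c, r)).1 = c + pvGoB (js.map (fun j => start + j)) r := by
  induction js with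
  | nil => intro c r; simp [pvGoB]
  | cons j t ih =>
    intro c r
    simp only [List.foldl_cons, yearStepB_eq, List.map_cons, pvGoB]
    rw [ih]
    ring

lemma yrs_append (a : Nat) : ∀ (y : Int) (b : Nat),
    pvYrs y (a + b) = pvYrs y a ++ pvYrs (y + a) b := by
  induction a with
  | zero => intro y b; simp [pvYrs]
  | succ a ih =>
    intro y b
    rw [show a + 1 + b = (a + b) + 1 from by omega]
    simp only [pvYrs, ih (y + 1) b, List.cons_append]
    congr 2
    push_cast
    ring

lemma yrs_shift (k : Nat) : ∀ y : Int, pvYrs (y + 400) k = (pvYrs y k).map (fun j => j + 400) := by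
  induction k with
  | zero => intro y; rfl
  | succ k ih =>
    intro y
    simp only [pvYrs, List.map_cons]
    rw [show y + 400 + 1 = (y + 1) + 400 from by ring, ih (y + 1)]

lemma map_add_yrs (k : Nat) : ∀ z y : Int, (pvYrs z k).map (fun j => y + j) = pvYrs (y + z) k := by
  induction k with
  | zero => intro z y; rfl
  | succ k ih =>
    intro z y
    simp only [pvYrs, List.map_cons]
    rw [ih (z + 1) y, show y + (z + 1) = (y + z) + 1 from by ring]

lemma pyRange_eq_yrs (k : Nat) : ∀ a b : Int, b - a = k →
    PySem.List.pyRange a b 1 = pvYrs a k := by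
  induction k with
  | zero => intro a b h; rw [PySem.List.pyRange_one_eq_nil (by omega)]; rfl
  | succ k ih =>
    intro a b h
    rw [PySem.List.pyRange_one_cons (by push_cast at h; omega)]
    simp only [pvYrs]
    rw [ih (a + 1) b (by push_cast at h ⊢; omega)]

lemma goB_append (l1 : List Int) : ∀ (l2 : List Int) (r : Int),
    pvGoB (l1 ++ l2) r = pvGoB l1 r + pvGoB l2 (pvAfter l1 r) := by
  induction l1 with
  | nil => intro l2 r; simp [pvGoB, pvAfter]
  | cons y t ih => intro l2 r; simp only [List.cons_append, pvGoB, pvAfter, ih]; ring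

lemma goB_map400 (l : List Int) : ∀ r : Int, pvGoB (l.map (fun j => j + 400)) r = pvGoB l r := by
  induction l with
  | nil => intro r; rfl
  | cons y t ih =>
    intro r
    simp only [List.map_cons, pvGoB, pvLp_400, ih]

lemma days_cons (y : Int) (t : List Int) : pvDays (y :: t) = 365 + pvLp y + pvDays t := by
  simp [pvDays]

lemma after_eq (l : List Int) : ∀ r : Int, 0 ≤ r → r < 7 → pvAfter l r = (r + pvDays l) % 7 := by
  induction l with
  | nil => intro r h0 h1; simp [pvAfter, pvDays]; omega
  | cons y t ih =>
    intro r h0 h1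
    simp only [pvAfter]
    rw [ih _ (by omega) (by omega), days_cons]
    omega

set_option maxRecDepth 10000 in
lemma natLpSum : ((List.range 400).map natLp).sum = 97 := by decide

lemma days_aux (k : Nat) : ∀ a : Nat,
    pvDays (pvYrs (a : Int) k) = 365 * k + (((List.range' a k).map natLp).sum : Int) := by
  induction k with
  | zero => intro a; simp [pvYrs, pvDays]
  | succ k ih =>
    intro a
    simp only [pvYrs]
    rw [days_cons, show ((a : Int) + 1) = ((a + 1 : Nat) : Int) from by push_cast; ring,
      ih (a + 1), pvLp_natCast, List.range'_succ]
    simp only [List.map_cons, List.sum_cons]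
    push_cast
    ring

lemma days400_zero : pvDays (pvYrs 0 400) = 146097 := by
  have h := days_aux 400 0
  rw [show ((0 : Nat) : Int) = 0 from rfl] at h
  rw [h, show List.range' 0 400 = List.range 400 from List.range_eq_range'.symm, natLpSum]
  norm_num

lemma days_shift (y : Int) : pvDays (pvYrs (y + 1) 400) = pvDays (pvYrs y 400) := by
  have h1 : pvYrs y 401 = pvYrs y 1 ++ pvYrs (y + 1) 400 := yrs_append 1 y 400
  have h2 : pvYrs y 401 = pvYrs y 400 ++ pvYrs (y + 400) 1 := yrs_append 400 y 1
  have e1 : pvDays (pvYrs y 1) = 365 + pvLp y := by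
    simp [pvYrs, pvDays]
  have e2 : pvDays (pvYrs (y + 400) 1) = 365 + pvLp y := by
    simp [pvYrs, pvDays]; rw [pvLp_400]
  have h3 := congrArg pvDays (h1.symm.trans h2)
  rw [show pvDays (pvYrs y 1 ++ pvYrs (y + 1) 400)
      = pvDays (pvYrs y 1) + pvDays (pvYrs (y + 1) 400) from by simp [pvDays]] at h3
  rw [show pvDays (pvYrs y 400 ++ pvYrs (y + 400) 1)
      = pvDays (pvYrs y 400) + pvDays (pvYrs (y + 400) 1) from by simp [pvDays]] at h3
  rw [e1, e2] at h3
  -- h3 mentions `Nat.cast 1` / `Nat.cast 400` only through pvYrs arguments, all syntactic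
  omega

lemma days400 (y : Int) : pvDays (pvYrs y 400) = 146097 := by
  induction y using Int.induction_on with
  | zero => exact days400_zero
  | succ i ih => rw [days_shift]; exact ih
  | pred i ih =>
    have h := days_shift (-(i : Int) - 1)
    rw [show (-(i : Int) - 1 + 1) = -(i : Int) from by ring] at h
    omega

lemma after400 (y : Int) : pvAfter (pvYrs y 400) 2 = 2 := by
  rw [after_eq _ 2 (by norm_num) (by norm_num), days400]
  decide

lemma blocks (q : Nat) : ∀ (y : Int) (m : Nat),
    pvGoB (pvYrs y (400 * q + m)) 2
      = (q : Int) * pvGoB (pvYrs y 400) 2 + pvGoB (pvYrs y m) 2 := by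
  induction q with
  | zero => intro y m; simp
  | succ q ih =>
    intro y m
    rw [show 400 * (q + 1) + m = 400 + (400 * q + m) from by ring]
    rw [yrs_append 400 y (400 * q + m), goB_append, after400]
    rw [show ((400 : Nat) : Int) = (400 : Int) from by norm_num]
    rw [ih (y + 400) m, yrs_shift, yrs_shift, goB_map400, goB_map400]
    push_cast
    ring

lemma blockCount_eq (start : Int) (k : Int) (hk : 0 ≤ k) :
    blockCount start k = pvGoB (pvYrs start k.toNat) 2 := by
  unfold blockCount
  rw [pyRange_eq_yrs k.toNat 0 k (by omega), blockB_eq, map_add_yrs, add_zero]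
  omega

-- ===== VERDICT (by name: the statement is the Claim_ definition above) =====
theorem count_sundays_spec : Claim_equal_count_sundays := by
  intro start end_ _
  unfold Spec_count_sundays count_sundays count_sundays_alt
  by_cases hn : end_ - start + 1 ≤ 0
  · rw [if_pos hn, PySem.List.pyRange_one_eq_nil (by omega)]
    rfl
  · rw [if_neg hn]
    rw [pyRange_eq_yrs (end_ - start + 1).toNat start (end_ + 1) (by omega)]
    rw [outerA_snd]
    set n := end_ - start + 1 with hdefn
    have hq : PySem.Int.floordiv n 400 = n / 400 := PySem.Int.floordiv_eq_ediv_of_pos (by norm_num)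
    have hr : PySem.Int.mod n 400 = n % 400 := PySem.Int.mod_eq_emod_of_pos (by norm_num)
    rw [hq, hr, blockCount_eq start 400 (by norm_num), blockCount_eq start (n % 400) (by omega)]
    rw [show ((400 : Int)).toNat = 400 from rfl]
    rw [← goB_eq_pvYH (pvYrs start n.toNat) 2 2 rfl]
    rw [show n.toNat = 400 * (n / 400).toNat + (n % 400).toNat from by omega]
    rw [blocks ((n / 400).toNat) start ((n % 400).toNat)]
    rw [show (((n / 400).toNat : Nat) : Int) = n / 400 from by omega]
    ring
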